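-- pv_equiv track=rewrite | github.com/revaldinho/f100l | src/F100_Opcodes/OpcodeF0_Shift.py | sll
-- ===== SOURCE A (Python) =====
-- def sll( a, num):
--     # Single shift left arithmetic of 16b number by 0-15 places
--     # return overflow set if any bit passing through the MSB is different to the original sign bit
--     overflow = 0
--     operand = a
--     for i in range(0, num):
--         operand = operand << 1
--         if (operand & 0x8000) != (a & 0x8000):
--             overflow = 1
--     return (operand  & 0xFFFF, overflow)
-- ===== SOURCE B (Python) =====
-- def sll(a, num):
--     # Closed-form: overflow iff some bit in the window that passes through the
--     # MSB during shifts 1..num differs from the original sign bit.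
--     av = a & 0xFFFF
--     if num <= 0:
--         return (av, 0)
--     sign = av >> 15
--     lo = 15 - num if num < 15 else 0
--     mask = 0x7FFF - ((1 << lo) - 1)          # bits lo..14
--     if sign == 0:
--         overflow = 1 if (av & mask) != 0 else 0
--     else:
--         overflow = 1 if (av & mask) != mask or num > 15 else 0
--     return ((av << num) & 0xFFFF, overflow)
-- ===== Notes on version B (the rewrite author's own statement) =====
-- stated objective: faster
-- what changed: Replaces A's per-shift loop (num iterations, each shifting and testing the MSB) with a closed-form bit-mask test: overflow holds iff the bits of a that pass through the MSB (bits max(0,15-num)..14, plus the zeros shifted in when num>15) are not all equal to the sign bit, computed with one mask comparison and one shift.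
import Mathlib
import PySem

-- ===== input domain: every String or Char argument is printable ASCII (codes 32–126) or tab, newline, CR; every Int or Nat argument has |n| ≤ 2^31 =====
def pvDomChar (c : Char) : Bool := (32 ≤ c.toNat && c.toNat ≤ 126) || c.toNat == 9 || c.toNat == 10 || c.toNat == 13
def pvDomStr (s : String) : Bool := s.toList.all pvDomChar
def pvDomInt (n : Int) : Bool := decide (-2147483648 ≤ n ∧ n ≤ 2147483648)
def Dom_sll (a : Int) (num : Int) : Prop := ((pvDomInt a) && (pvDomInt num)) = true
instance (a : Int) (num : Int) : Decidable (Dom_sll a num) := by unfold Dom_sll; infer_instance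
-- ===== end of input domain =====

-- B replaces A's shift-and-test loop by a closed-form mask test on the bits that
-- pass through the MSB (objective: faster, O(1) instead of O(num) iterations).

-- ===== PORT A =====
-- body of A's for-loop; state = (overflow, operand)
def sllStep (a : Int) (st : Int × Int) (_i : Int) : Int × Int :=
  let operand := st.2 <<< (1 : Nat)
  let overflow : Int :=
    if PySem.Int.band operand 0x8000 ≠ PySem.Int.band a 0x8000 then 1 else st.1
  (overflow, operand)

def sll (a : Int) (num : Int) : Int × Int :=
  let st := (PySem.List.pyRange 0 num 1).foldl (sllStep a) (0, a)
  (PySem.Int.band st.2 0xFFFF, st.1)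

-- ===== PORT B =====
def sll_alt (a : Int) (num : Int) : Int × Int :=
  let av := PySem.Int.band a 0xFFFF
  if num ≤ 0 then (av, 0)
  else
    let sign := av >>> (15 : Nat)
    let lo : Int := if num < 15 then 15 - num else 0
    let mask : Int := 0x7FFF - (((1 : Int) <<< lo.toNat) - 1)
    let overflow : Int :=
      if sign = 0 then (if PySem.Int.band av mask ≠ 0 then 1 else 0)
      else (if PySem.Int.band av mask ≠ mask ∨ 15 < num then 1 else 0)
    (PySem.Int.band (av <<< num.toNat) 0xFFFF, overflow)

-- ===== PRECONDITION & SPEC =====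
def Spec_sll (a : Int) (num : Int) (out : Int × Int) : Prop := out = sll_alt a num
instance (a : Int) (num : Int) (out : Int × Int) : Decidable (Spec_sll a num out) := by unfold Spec_sll; infer_instance

-- ===== CLAIM (what is proved, stated in full; the proofs are below) =====
def Claim_equal_sll : Prop := ∀ (a : Int) (num : Int), Dom_sll a num → Spec_sll a num (sll a num)

-- ===== LEMMAS AND PROOFS =====

/-- bit `k` of `x` (two's complement), as an integer 0 or 1 -/
def ibit (x : Int) (k : Nat) : Int := x / 2 ^ k % 2

theorem natAnd15 (m : Nat) : m &&& 32768 = m / 32768 % 2 * 32768 := by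
  have h := Nat.and_two_pow m 15
  have h2 : m.testBit 15 = decide (m / 2 ^ 15 % 2 = 1) := Nat.testBit_eq_decide_div_mod_eq
  simp only [show (2:ℕ) ^ 15 = 32768 from by norm_num] at h h2
  rw [h, h2]
  by_cases hb : m / 32768 % 2 = 1
  · simp [hb]
  · simp [hb]; omega

theorem natAndFF (m : Nat) : m &&& 65535 = m % 65536 := by
  have h := Nat.and_two_pow_sub_one_eq_mod m 16
  norm_num at h
  exact h

theorem band_ff (x : Int) : PySem.Int.band x 65535 = x % 65536 := by
  unfold PySem.Int.band
  have e : (65535 : Int).toNat = 65535 := rfl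
  by_cases hx : 0 ≤ x
  · rw [if_pos hx, if_pos (by norm_num : (0:Int) ≤ 65535), e]
    have h := natAndFF x.toNat
    omega
  · rw [if_neg hx, if_pos (by norm_num : (0:Int) ≤ 65535), e]
    have h := natAndFF (-x - 1).toNat
    rw [Nat.and_comm] at h
    omega

theorem band_8000 (x : Int) : PySem.Int.band x 32768 = 32768 * ibit x 15 := by
  unfold PySem.Int.band ibit
  have e : (32768 : Int).toNat = 32768 := rfl
  have e2 : (2 : Int) ^ 15 = 32768 := by norm_num
  rw [e2]
  by_cases hx : 0 ≤ x
  · rw [if_pos hx, if_pos (by norm_num : (0:Int) ≤ 32768), e]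
    have h := natAnd15 x.toNat
    omega
  · rw [if_neg hx, if_pos (by norm_num : (0:Int) ≤ 32768), e]
    have h := natAnd15 (-x - 1).toNat
    rw [Nat.and_comm] at h
    omega

theorem ibit_add_mul (r q : Int) (k : Nat) (hk : k ≤ 15) :
    ibit (r + 65536 * q) k = ibit r k := by
  unfold ibit
  have h1 : (65536 : Int) * q = q * 2 ^ (16 - k) * 2 ^ k := by
    rw [mul_comm, mul_assoc, ← pow_add]
    have : 16 - k + k = 16 := by omega
    rw [this]; norm_num
  rw [h1, Int.add_mul_ediv_right _ _ (pow_ne_zero k (by norm_num : (2:Int) ≠ 0))]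
  have h2 : q * 2 ^ (16 - k) = 2 * (q * 2 ^ (15 - k)) := by
    have : 16 - k = 15 - k + 1 := by omega
    rw [this, pow_succ]; ring
  rw [h2]
  generalize r / 2 ^ k = A
  generalize q * 2 ^ (15 - k) = B
  omega

theorem ibit_emod (x : Int) (k : Nat) (hk : k ≤ 15) :
    ibit (x % 65536) k = ibit x k := by
  have h := ibit_add_mul (x % 65536) (x / 65536) k hk
  have hx : x % 65536 + 65536 * (x / 65536) = x := by omega
  rw [hx] at h
  exact h.symm

theorem ibit_mul_pow_le (x : Int) (i : Nat) (hi : i ≤ 15) :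
    ibit (x * 2 ^ i) 15 = ibit x (15 - i) := by
  unfold ibit
  have h : x * 2 ^ i / 2 ^ 15 = x / 2 ^ (15 - i) := by
    have h2 : (2 : Int) ^ 15 = 2 ^ i * 2 ^ (15 - i) := by
      rw [← pow_add]; congr 1; omega
    rw [h2, mul_comm x, Int.mul_ediv_mul_of_pos _ _ (by positivity)]
  rw [h]

theorem ibit_mul_pow_gt (x : Int) (i : Nat) (hi : 16 ≤ i) :
    ibit (x * 2 ^ i) 15 = 0 := by
  unfold ibit
  have h2 : x * 2 ^ i / 2 ^ 15 = x * 2 ^ (i - 15) := by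
    have h : x * 2 ^ i = x * 2 ^ (i - 15) * 2 ^ 15 := by
      rw [mul_assoc, ← pow_add]; congr 2; omega
    rw [h, Int.mul_ediv_cancel _ (by positivity)]
  rw [h2]
  have h3 : x * 2 ^ (i - 15) = x * 2 ^ (i - 16) * 2 := by
    rw [mul_assoc]; congr 1
    rw [← pow_succ]; congr 1; omega
  rw [h3, Int.mul_emod_left]

theorem ibit_natCast (m : Nat) (k : Nat) :
    ibit (↑m) k = if m.testBit k then 1 else 0 := by
  unfold ibit
  rw [Nat.testBit_eq_decide_div_mod_eq]
  rw [show ((2:Int) ^ k) = ((2 ^ k : Nat) : Int) by push_cast; ring]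
  rw [show ((m : Int)) / ((2 ^ k : Nat) : Int) = ((m / 2 ^ k : Nat) : Int) from by
    exact_mod_cast rfl]
  rw [show (((m / 2 ^ k : Nat) : Int)) % 2 = ((m / 2 ^ k % 2 : Nat) : Int) from by
    exact_mod_cast rfl]
  generalize m / 2 ^ k = t
  by_cases hb : t % 2 = 1
  · simp [hb]
  · simp [hb]; omega

theorem maskN_testBit (lo k : Nat) (h : lo ≤ 15) :
    (2 ^ 15 - 2 ^ lo : Nat).testBit k = (decide (lo ≤ k) && decide (k < 15)) := by
  have h1 : (2 : Nat) ^ 15 - 2 ^ lo = (2 ^ (15 - lo) - 1) <<< lo := by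
    rw [Nat.shiftLeft_eq, Nat.sub_mul, one_mul, ← pow_add, Nat.sub_add_cancel h]
  rw [h1, Nat.testBit_shiftLeft, Nat.testBit_two_pow_sub_one]
  by_cases h2 : lo ≤ k <;> by_cases h3 : k < 15 <;>
    simp [ge_iff_le, h2, h3] <;> omega

theorem and_mask_eq_zero (m lo : Nat) (h : lo ≤ 15) :
    m &&& (2 ^ 15 - 2 ^ lo) = 0 ↔ ∀ k, lo ≤ k → k < 15 → m.testBit k = false := by
  constructor
  · intro he k hk1 hk2
    have ht := congrArg (fun t => t.testBit k) he
    simp only [Nat.testBit_land, Nat.zero_testBit] at ht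
    rw [maskN_testBit lo k h] at ht
    simpa [hk1, hk2] using ht
  · intro hall
    apply Nat.eq_of_testBit_eq
    intro k
    simp only [Nat.testBit_land, Nat.zero_testBit, maskN_testBit lo k h]
    by_cases h2 : lo ≤ k <;> by_cases h3 : k < 15 <;>
      simp [h2, h3, hall]

theorem and_mask_eq_mask (m lo : Nat) (h : lo ≤ 15) :
    m &&& (2 ^ 15 - 2 ^ lo) = 2 ^ 15 - 2 ^ lo ↔
      ∀ k, lo ≤ k → k < 15 → m.testBit k = true := by
  constructor
  · intro he k hk1 hk2
    have ht := congrArg (fun t => t.testBit k) he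
    simp only [Nat.testBit_land] at ht
    rw [maskN_testBit lo k h] at ht
    simpa [hk1, hk2] using ht
  · intro hall
    apply Nat.eq_of_testBit_eq
    intro k
    simp only [Nat.testBit_land, maskN_testBit lo k h]
    by_cases h2 : lo ≤ k <;> by_cases h3 : k < 15 <;>
      simp [h2, h3, hall]

/-- the loop of A sets overflow iff some produced MSB differs from the original one -/
def aOvB (a : Int) (n : Nat) : Bool :=
  (List.range n).any fun j =>
    PySem.Int.band (a * 2 ^ (j + 1)) 0x8000 != PySem.Int.band a 0x8000

theorem sll_loop (a : Int) (n : Nat) :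
    (List.range n).foldl (fun st (k : Nat) => sllStep a st (0 + ↑k)) (0, a)
      = ((if aOvB a n then 1 else 0), a * 2 ^ n) := by
  induction n with
  | zero => simp [aOvB]
  | succ n ih =>
    rw [List.range_succ, List.foldl_append, ih]
    simp only [List.foldl_cons, List.foldl_nil]
    have hsh : (a * 2 ^ n) <<< (1 : Nat) = a * 2 ^ (n + 1) := by
      rw [Int.shiftLeft_eq, pow_succ]; ring
    unfold sllStep
    simp only [hsh]
    have hA : aOvB a (n + 1)
        = (aOvB a n || (PySem.Int.band (a * 2 ^ (n + 1)) 0x8000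
            != PySem.Int.band a 0x8000)) := by
      unfold aOvB
      rw [List.range_succ, List.any_append]
      simp
    by_cases hc : PySem.Int.band (a * 2 ^ (n + 1)) 0x8000 = PySem.Int.band a 0x8000
    · simp [hA, hc]
    · simp [hA, hc]

theorem aOvB_iff (a : Int) (n : Nat) (m : Nat) (hm : a % 65536 = (m : Int))
    (lo : Nat) (hlo : lo = if n < 15 then 15 - n else 0) :
    (aOvB a n = true) ↔
      ((∃ k, lo ≤ k ∧ k < 15 ∧ m.testBit k ≠ m.testBit 15)
        ∨ (16 ≤ n ∧ m.testBit 15 = true)) := by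
  have hA15 : ibit a 15 = if m.testBit 15 then 1 else 0 := by
    rw [← ibit_emod a 15 le_rfl, hm, ibit_natCast]
  have hcond : ∀ j : Nat,
      ((PySem.Int.band (a * 2 ^ (j + 1)) 0x8000 != PySem.Int.band a 0x8000) = true
        ↔ ibit (a * 2 ^ (j + 1)) 15 ≠ ibit a 15) := by
    intro j
    rw [bne_iff_ne, band_8000, band_8000]
    constructor
    · intro h h2; exact h (by rw [h2])
    · intro h h2; exact h (mul_left_cancel₀ (by norm_num) h2)
  unfold aOvB
  rw [List.any_eq_true]
  constructor
  · rintro ⟨j, hjmem, hj⟩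
    rw [List.mem_range] at hjmem
    rw [hcond j] at hj
    by_cases hj14 : j ≤ 14
    · left
      refine ⟨14 - j, ?_, by omega, ?_⟩
      · rw [hlo]; split <;> omega
      · rw [ibit_mul_pow_le a (j + 1) (by omega),
          show 15 - (j + 1) = 14 - j from by omega,
          ← ibit_emod a (14 - j) (by omega), hm, ibit_natCast, hA15] at hj
        intro hEq; exact hj (by rw [hEq])
    · right
      rw [ibit_mul_pow_gt a (j + 1) (by omega), hA15] at hj
      refine ⟨by omega, ?_⟩
      by_cases hb : m.testBit 15
      · exact hb
      · simp [hb] at hj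
  · rintro (⟨k, hk1, hk2, hk3⟩ | ⟨h16, hsb⟩)
    · refine ⟨14 - k, ?_, ?_⟩
      · rw [List.mem_range]
        rw [hlo] at hk1
        by_cases h15 : n < 15
        · rw [if_pos h15] at hk1; omega
        · rw [if_neg h15] at hk1; omega
      · rw [hcond _, ibit_mul_pow_le a (14 - k + 1) (by omega),
          show 15 - (14 - k + 1) = k from by omega,
          ← ibit_emod a k (by omega), hm, ibit_natCast, hA15]
        by_cases b1 : m.testBit k <;> by_cases b2 : m.testBit 15 <;>
          simp [b1, b2] at hk3 ⊢
    · refine ⟨15, ?_, ?_⟩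
      · rw [List.mem_range]; omega
      · rw [hcond _, ibit_mul_pow_gt a (15 + 1) (by omega), hA15, hsb]
        simp

-- ===== VERDICT (by name: the statement is the Claim_ definition above) =====
theorem sll_spec : Claim_equal_sll := by
  intro a num _dom
  unfold Spec_sll
  by_cases hnum : num ≤ 0
  · -- empty loop
    have hr : (num - 0).toNat = 0 := by omega
    simp only [sll, sll_alt, PySem.List.pyRange_one, hr, List.range_zero, List.map_nil,
      List.foldl_nil, if_pos hnum]
  · -- num ≥ 1
    have hn1 : 1 ≤ num.toNat := by omega
    set n := num.toNat with hn
    have hnum' : num = (n : Int) := by omega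
    set r := a % 65536 with hrdef
    have hr0 : 0 ≤ r := by omega
    have hr1 : r < 65536 := by omega
    set m := r.toNat with hm
    have hmr : r = (m : Int) := by omega
    have hmlt : m < 65536 := by omega
    set sb := m.testBit 15 with hsb
    set loN : Nat := if n < 15 then 15 - n else 0 with hloN
    have hlo15 : loN ≤ 15 := by rw [hloN]; split <;> omega
    -- evaluate port A
    have hA : sll a num
        = (PySem.Int.band (a * 2 ^ n) 0xFFFF, if aOvB a n then 1 else 0) := by
      simp only [sll, PySem.List.pyRange_one, List.foldl_map, sub_zero, ← hn, sll_loop]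
    have hmI : a % 65536 = (m : Int) := by omega
    set M : Nat := 2 ^ 15 - 2 ^ loN with hM
    -- B-side value bridges
    have havr : PySem.Int.band a 0xFFFF = r := band_ff a
    have hsign : r >>> (15 : Nat) = ((m / 32768 : Nat) : Int) := by
      rw [Int.shiftRight_eq_div_pow, hmr]
      norm_num
    have hsbdiv : m / 32768 = if m.testBit 15 then 1 else 0 := by
      have h2 : m.testBit 15 = decide (m / 2 ^ 15 % 2 = 1) :=
        Nat.testBit_eq_decide_div_mod_eq
      simp only [show (2 : ℕ) ^ 15 = 32768 from by norm_num] at h2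
      have hd : m / 32768 = 0 ∨ m / 32768 = 1 := by omega
      rcases hd with hd | hd <;> simp [h2, hd]
    have hloI : (if num < (15 : Int) then 15 - num else 0).toNat = loN := by
      by_cases h15 : n < 15
      · rw [hloN, if_pos (show num < 15 by omega), if_pos h15]; omega
      · rw [hloN, if_neg (show ¬ num < 15 by omega), if_neg h15]; rfl
    have hpowle : (2 : Nat) ^ loN ≤ 2 ^ 15 := Nat.pow_le_pow_right (by norm_num) hlo15
    have hmaskI : (32767 : Int) - ((1 : Int) <<< loN - 1) = (M : Int) := by
      rw [Int.shiftLeft_eq, one_mul, hM, Nat.cast_sub hpowle]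
      push_cast
      generalize (2 : Int) ^ loN = X
      omega
    have hMnn : (0 : Int) ≤ (M : Int) := by positivity
    have hband : PySem.Int.band r (M : Int) = ((m &&& M : Nat) : Int) := by
      rw [PySem.Int.band_of_nonneg hr0 hMnn, Int.toNat_natCast,
        show r.toNat = m from by omega]
    -- first components agree
    have hfst : PySem.Int.band (a * 2 ^ n) 0xFFFF
        = PySem.Int.band (r <<< num.toNat) 0xFFFF := by
      rw [band_ff, band_ff, ← hn, Int.shiftLeft_eq]
      conv_lhs => rw [Int.mul_emod]
      conv_rhs => rw [Int.mul_emod]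
      rw [show a % 65536 = r % 65536 from by omega]
    -- assemble
    rw [hA, hfst]
    simp only [sll_alt, if_neg hnum, havr, hsign, hloI, hmaskI, hband]
    congr 1
    have hiffA := aOvB_iff a n m hmI loN hloN
    rw [hsbdiv]
    by_cases hsb15 : m.testBit 15
    · -- sign bit set
      simp only [hsb15, if_true, Nat.cast_one]
      rw [if_neg (by norm_num : ¬(1 : Int) = 0)]
      have hnum15 : ((15 : Int) < num) ↔ 16 ≤ n := by omega
      have hmm : ((m &&& M : Nat) : Int) ≠ (M : Int) ↔ ¬(m &&& M = M) := by
        constructor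
        · intro h h2; exact h (by exact_mod_cast h2)
        · intro h h2; exact h (by exact_mod_cast h2)
      have hex : (aOvB a n = true) ↔ (¬(m &&& M = M) ∨ 16 ≤ n) := by
        rw [hiffA, hM, and_mask_eq_mask m loN hlo15]
        constructor
        · rintro (⟨k, h1, h2, h3⟩ | ⟨h1, _⟩)
          · exact Or.inl fun hall => h3 (by rw [hall k h1 h2, hsb15])
          · exact Or.inr h1
        · rintro (hna | h16)
          · left
            push Not at hna
            obtain ⟨k, h1, h2, h3⟩ := hna
            exact ⟨k, h1, h2, by simp [hsb15, h3]⟩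
          · exact Or.inr ⟨h16, hsb15⟩
      by_cases hv : aOvB a n
      · have hc : (((m &&& M : Nat) : Int) ≠ (M : Int) ∨ (15 : Int) < num) := by
          rcases hex.mp hv with h | h
          · exact Or.inl (hmm.mpr h)
          · exact Or.inr (hnum15.mpr h)
        rw [if_pos hv, if_pos hc]
      · have hc : ¬(((m &&& M : Nat) : Int) ≠ (M : Int) ∨ (15 : Int) < num) := by
          rintro (h | h)
          · exact hv (hex.mpr (Or.inl (hmm.mp h)))
          · exact hv (hex.mpr (Or.inr (hnum15.mp h)))
        rw [if_neg hv, if_neg hc]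
    · -- sign bit clear
      have hf : m.testBit 15 = false := by simpa using hsb15
      simp only [hf, Bool.false_eq_true, if_false, Nat.cast_zero]
      rw [if_pos trivial]
      have hmm : ((m &&& M : Nat) : Int) ≠ 0 ↔ ¬(m &&& M = 0) := by
        constructor
        · intro h h2; exact h (by exact_mod_cast h2)
        · intro h h2; exact h (by exact_mod_cast h2)
      have hex : (aOvB a n = true) ↔ ¬(m &&& M = 0) := by
        rw [hiffA, hM, and_mask_eq_zero m loN hlo15]
        constructor
        · rintro (⟨k, h1, h2, h3⟩ | ⟨_, h2⟩)
          · exact fun hall => h3 (by rw [hall k h1 h2, hf])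
          · exact absurd h2 hsb15
        · intro hna
          left
          push Not at hna
          obtain ⟨k, h1, h2, h3⟩ := hna
          exact ⟨k, h1, h2, by simp [hf, h3]⟩
      by_cases hv : aOvB a n
      · have hc : ((m &&& M : Nat) : Int) ≠ 0 := hmm.mpr (hex.mp hv)
        rw [if_pos hv, if_pos hc]
      · have hc : ¬((m &&& M : Nat) : Int) ≠ 0 := fun h => hv (hex.mpr (hmm.mp h))
        rw [if_neg hv, if_neg hc]
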